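-- pv_equiv track=rewrite | github.com/jahirulislammolla/CodeFights | Fights/sumOfPowers.py | sumOfPowers
-- ===== SOURCE A (Python) =====
-- def sumOfPowers(n, divisor):
--     s=0
--     for i in range(1,n+1):
--         k=0
--         while i%(divisor**k)==0:
--             k+=1
--         s+=k-1
--     return s
-- ===== SOURCE B (Python) =====
-- def sumOfPowers(n, divisor):
--     # Legendre-style: sum of floor(n / d^j) over the powers d^j <= n
--     d = abs(divisor)
--     total = 0
--     p = d
--     while 1 <= p <= n:
--         total += n // p
--         p *= d
--     return total
-- ===== Notes on version B (the rewrite author's own statement) =====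
-- stated objective: faster
-- what changed: Replaces the per-integer inner exponent loop over 1..n by the Legendre identity: sum of floor(n/|divisor|^j) over the powers |divisor|^j <= n, computed in one geometric loop.
import Mathlib
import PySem

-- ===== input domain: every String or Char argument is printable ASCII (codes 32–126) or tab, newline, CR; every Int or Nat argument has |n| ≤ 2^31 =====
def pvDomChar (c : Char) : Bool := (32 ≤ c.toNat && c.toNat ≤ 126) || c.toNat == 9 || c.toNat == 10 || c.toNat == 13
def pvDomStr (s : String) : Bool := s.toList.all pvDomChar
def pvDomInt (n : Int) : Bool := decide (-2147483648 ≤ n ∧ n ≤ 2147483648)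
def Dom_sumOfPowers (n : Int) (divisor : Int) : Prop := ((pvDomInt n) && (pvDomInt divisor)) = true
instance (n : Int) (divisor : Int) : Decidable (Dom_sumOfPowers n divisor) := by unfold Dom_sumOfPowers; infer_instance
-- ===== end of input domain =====

-- B replaces A's O(n log n) per-integer exponent count by the Legendre identity
-- sum_{j>=1, |divisor|^j <= n} floor(n / |divisor|^j), a single O(log n) geometric loop.

-- ===== PORT A =====
-- inner 'while i%(divisor**k)==0: k+=1' then contributes k-1; fuel only makes the
-- loop total (it provably suffices on Pre_; outside Pre_ the Python loop raises/diverges)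
def sumOfPowersGoA (i divisor : Int) : Nat → Nat → Int
  | 0, k => (k : Int) - 1
  | fuel+1, k =>
      if PySem.Int.mod? i (divisor ^ k) = some 0 then sumOfPowersGoA i divisor fuel (k+1)
      else (k : Int) - 1

def sumOfPowers (n : Int) (divisor : Int) : Int :=
  (PySem.List.pyRange 1 (n+1) 1).foldl
    (fun s i => s + sumOfPowersGoA i divisor (i.toNat + 2) 0) 0

-- ===== PORT B =====
-- 'while 1 <= p <= n: total += n // p; p *= d'; the extra '2 ≤ d' guard only makes the
-- recursion total (for d ≤ 1 with 1 ≤ p ≤ n the Python loop never terminates)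
def sumOfPowersGoB (n d : Int) (p : Int) : Int :=
  if h : 2 ≤ d ∧ 1 ≤ p ∧ p ≤ n then
    PySem.Int.floordiv n p + sumOfPowersGoB n d (p * d)
  else 0
termination_by (n + 1 - p).toNat
decreasing_by
  have h1 : 1 ≤ p := h.2.1
  have h2 : 2 ≤ d := h.1
  have h3 : p ≤ n := h.2.2
  have : p + 1 ≤ p * d := by nlinarith
  omega

def sumOfPowers_alt (n : Int) (divisor : Int) : Int :=
  sumOfPowersGoB n |divisor| |divisor|

-- ===== PRECONDITION & SPEC =====
-- Pre_ excludes n ≥ 1 with |divisor| ≤ 1: there A never returns (divisor = 0 raises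
-- ZeroDivisionError at i % 0**1; divisor = ±1 loops forever). A returns on all other inputs.
def Pre_sumOfPowers (n : Int) (divisor : Int) : Prop := 1 ≤ n → 2 ≤ |divisor|
instance (n : Int) (divisor : Int) : Decidable (Pre_sumOfPowers n divisor) := by
  unfold Pre_sumOfPowers; infer_instance

def pvWitness_sumOfPowers : Int × Int := (10, 2)

def Spec_sumOfPowers (n : Int) (divisor : Int) (out : Int) : Prop := out = sumOfPowers_alt n divisor
instance (n : Int) (divisor : Int) (out : Int) : Decidable (Spec_sumOfPowers n divisor out) := by unfold Spec_sumOfPowers; infer_instance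

-- ===== CLAIM (what is proved, stated in full; the proofs are below) =====
def Claim_equal_sumOfPowers : Prop := ∀ (n : Int) (divisor : Int), Dom_sumOfPowers n divisor → Pre_sumOfPowers n divisor → Spec_sumOfPowers n divisor (sumOfPowers n divisor)

-- ===== LEMMAS AND PROOFS =====

-- proof-side counter: number of powers p, p*d, p*d², … that divide m (all ≤ m)
def cntPow (m d : Int) (p : Int) : Int :=
  if h : 2 ≤ d ∧ 1 ≤ p ∧ p ≤ m ∧ p ∣ m then 1 + cntPow m d (p * d) else 0
termination_by (m + 1 - p).toNat
decreasing_by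
  have h1 : 1 ≤ p := h.2.1
  have h2 : 2 ≤ d := h.1
  have h3 : p ≤ m := h.2.2.1
  have : p + 1 ≤ p * d := by nlinarith
  omega

theorem cntPow_of_not_dvd {m d p : Int} (h : ¬ p ∣ m) : cntPow m d p = 0 := by
  rw [cntPow]; simp [h]

theorem cntPow_of_dvd {m d p : Int} (hd : 2 ≤ d) (hp : 1 ≤ p) (hm : 1 ≤ m) (h : p ∣ m) :
    cntPow m d p = 1 + cntPow m d (p * d) := by
  have hpm : p ≤ m := Int.le_of_dvd (by omega) h
  rw [cntPow]; simp [hd, hp, hpm, h]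

-- A's inner loop: with enough fuel it computes k - 1 + cntPow m |divisor| (|divisor|^k)
theorem goA_eq_cntPow (m divisor : Int) (hm : 1 ≤ m) (hd : 2 ≤ |divisor|) :
    ∀ (fuel k : Nat), m < |divisor| ^ (k + fuel) →
      sumOfPowersGoA m divisor fuel k = (k : Int) - 1 + cntPow m |divisor| (|divisor| ^ k) := by
  intro fuel
  induction fuel with
  | zero =>
      intro k hlt
      rw [Nat.add_zero] at hlt
      have hnd : ¬ (|divisor| ^ k ∣ m) := by
        intro hdvd
        have := Int.le_of_dvd (by omega) hdvd
        omega
      simp [sumOfPowersGoA, cntPow_of_not_dvd hnd]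
  | succ fuel ih =>
      intro k hlt
      have hpk : (1:Int) ≤ |divisor| ^ k := one_le_pow₀ (by omega)
      have hne : divisor ^ k ≠ 0 := by
        intro h0
        have : |divisor| ^ k = 0 := by rw [← abs_pow, h0]; simp
        omega
      have hdvd_iff : divisor ^ k ∣ m ↔ |divisor| ^ k ∣ m := by
        rw [← abs_pow]; exact (abs_dvd _ _).symm
      rw [sumOfPowersGoA]
      by_cases hdvd : divisor ^ k ∣ m
      · rw [if_pos ((PySem.Int.mod?_eq_some_zero_iff_dvd hne).2 hdvd)]
        have habs : |divisor| ^ k ∣ m := hdvd_iff.1 hdvd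
        rw [ih (k+1) (by rw [show k + 1 + fuel = k + (fuel+1) from by omega]; exact hlt)]
        rw [cntPow_of_dvd (by omega) hpk hm habs, pow_succ]
        push_cast; ring
      · rw [if_neg (by
          intro hmod
          exact hdvd ((PySem.Int.mod?_eq_some_zero_iff_dvd hne).1 hmod))]
        have : ¬ (|divisor| ^ k ∣ m) := fun h => hdvd (hdvd_iff.2 h)
        rw [cntPow_of_not_dvd this]
        ring

theorem fuel_suffices (m d : Int) (hm : 1 ≤ m) (hd : 2 ≤ d) : m < d ^ (m.toNat + 2) := by
  have h2 : (m.toNat : Int) < 2 ^ (m.toNat + 2) := by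
    have := Nat.lt_two_pow_self (n := m.toNat)
    have h' : m.toNat < 2 ^ (m.toNat + 2) := lt_of_lt_of_le this (Nat.pow_le_pow_right (by omega) (by omega))
    exact_mod_cast h'
  have hle : (2:Int) ^ (m.toNat + 2) ≤ d ^ (m.toNat + 2) := pow_le_pow_left₀ (by omega) hd _
  omega

-- A's inner contribution at m equals cntPow m d d (start the chain at d = d^1)
theorem goA_full (m divisor : Int) (hm : 1 ≤ m) (hd : 2 ≤ |divisor|) :
    sumOfPowersGoA m divisor (m.toNat + 2) 0 = cntPow m |divisor| |divisor| := by
  have h := goA_eq_cntPow m divisor hm hd (m.toNat + 2) 0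
    (by simpa using fuel_suffices m |divisor| hm hd)
  rw [h, pow_zero, cntPow_of_dvd (by omega) (by norm_num) hm (one_dvd m), one_mul]
  push_cast
  ring

-- floor-division step: (m // p) - ((m-1) // p) is 1 exactly when p ∣ m
theorem floordiv_step (m p : Int) (hp : 1 ≤ p) :
    PySem.Int.floordiv m p = PySem.Int.floordiv (m-1) p + (if p ∣ m then 1 else 0) := by
  rw [PySem.Int.floordiv_eq_ediv_of_pos (by omega), PySem.Int.floordiv_eq_ediv_of_pos (by omega)]
  by_cases h : p ∣ m
  · rw [if_pos h]
    obtain ⟨q, rfl⟩ := h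
    rw [Int.mul_ediv_cancel_left _ (by omega)]
    have h3 : p * q - 1 = (p - 1) + p * (q - 1) := by ring
    rw [h3, Int.add_mul_ediv_left _ _ (by omega : p ≠ 0), Int.ediv_eq_zero_of_lt (by omega) (by omega)]
    ring
  · rw [if_neg h]
    have hmod : m % p ≠ 0 := fun h0 => h (Int.dvd_of_emod_eq_zero h0)
    have h1 : 0 ≤ m % p := Int.emod_nonneg m (by omega)
    have h2 : m % p < p := Int.emod_lt_of_pos m (by omega)
    have hz : (m % p - 1) / p = 0 := Int.ediv_eq_zero_of_lt (by omega) (by omega)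
    have hdec : m = p * (m / p) + m % p := (Int.ediv_add_emod m p).symm
    have h3 : m - 1 = (m % p - 1) + p * (m / p) := by omega
    rw [h3, Int.add_mul_ediv_left _ _ (by omega : p ≠ 0), hz]
    ring

-- B's loop as m grows by one: it gains exactly cntPow m d p
theorem goB_step (d : Int) (hd : 2 ≤ d) :
    ∀ (m p : Int), 1 ≤ p → 1 ≤ m →
      sumOfPowersGoB m d p = sumOfPowersGoB (m-1) d p + cntPow m d p := by
  intro m p
  induction hwf : (m + 1 - p).toNat using Nat.strong_induction_on generalizing p with
  | _ fuel ih =>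
    intro hp hm
    subst hwf
    by_cases hpm : p ≤ m
    · rw [sumOfPowersGoB, dif_pos ⟨hd, hp, hpm⟩]
      by_cases hpm1 : p ≤ m - 1
      · conv_rhs => rw [sumOfPowersGoB, dif_pos ⟨hd, hp, hpm1⟩]
        have hrec := ih (m + 1 - p * d).toNat
          (by have hplt : p + 1 ≤ p * d := by nlinarith
              omega)
          (p * d) rfl (by nlinarith) hm
        rw [hrec, floordiv_step m p hp]
        by_cases hdvd : p ∣ m
        · rw [if_pos hdvd, cntPow_of_dvd hd hp hm hdvd]; ring
        · rw [if_neg hdvd, cntPow_of_not_dvd hdvd,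
              cntPow_of_not_dvd (fun h => hdvd (dvd_trans (Dvd.intro d rfl) h))]
          ring
      · -- p = m
        have hpm' : p = m := by omega
        conv_rhs => rw [sumOfPowersGoB, dif_neg (by omega)]
        have hnext : sumOfPowersGoB m d (p * d) = 0 := by
          rw [sumOfPowersGoB, dif_neg (by intro ⟨_, _, h3⟩; nlinarith)]
        have hcnt : cntPow m d (p * d) = 0 := by
          apply cntPow_of_not_dvd
          intro h
          have := Int.le_of_dvd (by omega) h
          nlinarith
        subst hpm'
        rw [hnext, cntPow_of_dvd hd hp hm dvd_rfl, hcnt,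
            PySem.Int.floordiv_eq_ediv_of_pos (by omega), Int.ediv_self (by omega)]
        ring
    · rw [sumOfPowersGoB, dif_neg (by omega), sumOfPowersGoB, dif_neg (by omega)]
      rw [cntPow_of_not_dvd (fun h => by have := Int.le_of_dvd (by omega) h; omega)]
      simp
  
theorem goB_zero (n d p : Int) (h : n < p ∨ ¬ 2 ≤ d ∨ ¬ 1 ≤ p) : sumOfPowersGoB n d p = 0 := by
  rw [sumOfPowersGoB, dif_neg (by omega)]

-- main induction: A and B agree at every n = N ≥ 0 when 2 ≤ d = |divisor|
theorem main_eq (divisor : Int) (hd : 2 ≤ |divisor|) :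
    ∀ (N : Nat), sumOfPowers (N : Int) divisor = sumOfPowersGoB (N : Int) |divisor| |divisor| := by
  intro N
  induction N with
  | zero =>
      rw [sumOfPowers]
      rw [PySem.List.pyRange_one_eq_nil (by norm_num)]
      rw [goB_zero _ _ _ (Or.inl (by omega))]
      rfl
  | succ N ih =>
      have hN1 : ((N+1 : Nat) : Int) = (N:Int) + 1 := by push_cast; ring
      rw [hN1, sumOfPowers]
      have hsplit : PySem.List.pyRange 1 ((N:Int) + 1 + 1) 1
          = PySem.List.pyRange 1 ((N:Int) + 1) 1 ++ [(N:Int) + 1] := by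
        push_cast
        exact PySem.List.pyRange_one_succ_right (by omega)
      rw [hsplit, List.foldl_append]
      rw [show (PySem.List.pyRange 1 ((N:Int) + 1) 1).foldl
            (fun s i => s + sumOfPowersGoA i divisor (i.toNat + 2) 0) 0 = sumOfPowers (N:Int) divisor from rfl]
      rw [ih]
      simp only [List.foldl_cons, List.foldl_nil]
      have hm : (1:Int) ≤ (N:Int) + 1 := by omega
      rw [goA_full ((N:Int)+1) divisor hm hd]
      rw [goB_step |divisor| (by omega) ((N:Int)+1) |divisor| (by omega) hm]
      rw [show (N:Int) + 1 - 1 = (N:Int) from by ring]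

-- ===== VERDICT (by name: the statement is the Claim_ definition above) =====
theorem sumOfPowers_spec : Claim_equal_sumOfPowers := by
  intro n divisor _ hpre
  unfold Spec_sumOfPowers sumOfPowers_alt
  by_cases hn : 1 ≤ n
  · have hd := hpre hn
    obtain ⟨N, rfl⟩ := Int.eq_ofNat_of_zero_le (by omega : (0:Int) ≤ n)
    exact main_eq divisor hd N
  · rw [sumOfPowers, PySem.List.pyRange_one_eq_nil (by omega)]
    by_cases h2 : 2 ≤ |divisor|
    · rw [goB_zero _ _ _ (Or.inl (by omega))]; rfl
    · rw [goB_zero _ _ _ (Or.inr (Or.inl h2))]; rfl
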